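-- pv_equiv track=rewrite | github.com/PaRaD1SE98/4d-in-3d | main.py | oscillate_range
-- ===== SOURCE A (Python) =====
-- def oscillate_range(stop):
--     """
--     Generate 0, -1, 1, -2, 2, -3, 3, ..., -stop/2, stop/2
--     """
--     a, counter = 0, 0
--     while True:
--         if counter > stop:
--             return
--         yield a
--         if a == 0:
--             a -= 1
--         elif a < 0:
--             a = -a
--         else:
--             a = -a
--             a -= 1
--         counter += 1
-- ===== SOURCE B (Python) =====
-- def oscillate_range(stop):
--     i = 0
--     while i <= stop:
--         yield i // 2 if i % 2 == 0 else -(i + 1) // 2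
--         i += 1
-- ===== Notes on version B (the rewrite author's own statement) =====
-- stated objective: simpler
-- what changed: Replaces A's sign-flip/decrement state machine over a mutating value `a` with a single index loop that computes each yielded value by a closed form (i//2 for even i, -(i+1)//2 for odd i).
import Mathlib
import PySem

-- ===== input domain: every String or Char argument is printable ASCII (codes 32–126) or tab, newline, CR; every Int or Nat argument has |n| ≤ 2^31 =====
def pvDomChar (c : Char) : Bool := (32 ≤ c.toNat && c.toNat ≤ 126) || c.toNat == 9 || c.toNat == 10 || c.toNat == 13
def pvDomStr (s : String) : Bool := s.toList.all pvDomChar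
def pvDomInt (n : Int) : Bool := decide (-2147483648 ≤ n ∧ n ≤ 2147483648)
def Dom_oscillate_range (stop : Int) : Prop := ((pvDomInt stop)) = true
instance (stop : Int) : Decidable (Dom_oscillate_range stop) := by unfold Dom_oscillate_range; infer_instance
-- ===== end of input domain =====

-- B replaces A's sign-flip/decrement state machine by a closed-form value for each index (objective: simpler).
-- Both programs are Python generators; the ports return the list of all yielded values.

-- ===== PORT A =====
-- A's while-True loop over state (a, counter); exits when counter > stop.
def oscA_loop (stop a counter : Int) : List Int :=
  if counter > stop then []
  else
    a :: oscA_loop stop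
          (if a = 0 then a - 1 else if a < 0 then -a else -a - 1)
          (counter + 1)
termination_by (stop + 1 - counter).toNat
decreasing_by omega

def oscillate_range (stop : Int) : List Int := oscA_loop stop 0 0

-- ===== PORT B =====
-- B's while-loop over index i; each value is a closed form of i.
def oscB_loop (stop i : Int) : List Int :=
  if i ≤ stop then
    (if PySem.Int.mod i 2 = 0 then PySem.Int.floordiv i 2
     else PySem.Int.floordiv (-(i + 1)) 2) :: oscB_loop stop (i + 1)
  else []
termination_by (stop + 1 - i).toNat
decreasing_by omega

def oscillate_range_alt (stop : Int) : List Int := oscB_loop stop 0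

-- ===== PRECONDITION & SPEC =====
def Spec_oscillate_range (stop : Int) (out : List Int) : Prop := out = oscillate_range_alt stop
instance (stop : Int) (out : List Int) : Decidable (Spec_oscillate_range stop out) := by unfold Spec_oscillate_range; infer_instance

-- ===== CLAIM (what is proved, stated in full; the proofs are below) =====
def Claim_equal_oscillate_range : Prop := ∀ (stop : Int), Dom_oscillate_range stop → Spec_oscillate_range stop (oscillate_range stop)

-- ===== LEMMAS AND PROOFS =====

-- B's closed form for the value yielded at index i
def oscVal (i : Int) : Int :=
  if PySem.Int.mod i 2 = 0 then PySem.Int.floordiv i 2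
  else PySem.Int.floordiv (-(i + 1)) 2

lemma oscVal_step (c : Int) (hc : 0 ≤ c) :
    (if oscVal c = 0 then oscVal c - 1
     else if oscVal c < 0 then -(oscVal c) else -(oscVal c) - 1) = oscVal (c + 1) := by
  unfold oscVal
  simp only [PySem.Int.mod_eq_emod_of_pos (show (0:Int) < 2 by norm_num),
             PySem.Int.floordiv_eq_ediv_of_pos (show (0:Int) < 2 by norm_num)]
  split_ifs <;> omega

lemma oscLoop_eq (stop : Int) :
    ∀ (n : Nat) (c : Int), 0 ≤ c → (stop + 1 - c).toNat = n →
      oscA_loop stop (oscVal c) c = oscB_loop stop c := by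
  intro n
  induction n with
  | zero =>
    intro c hc hn
    rw [oscA_loop, oscB_loop]
    have : ¬ c ≤ stop := by omega
    simp [this, show stop < c by omega]
  | succ k ih =>
    intro c hc hn
    rw [oscA_loop, oscB_loop]
    by_cases h : c ≤ stop
    · simp only [show ¬ stop < c by omega, if_false, h, if_true]
      rw [oscVal_step c hc]
      exact congrArg _ (ih (c + 1) (by omega) (by omega))
    · simp [show stop < c by omega, h]

-- ===== VERDICT (by name: the statement is the Claim_ definition above) =====
theorem oscillate_range_spec : Claim_equal_oscillate_range := by
  intro stop _
  show oscillate_range stop = oscillate_range_alt stop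
  have h0 : oscVal 0 = 0 := by decide
  unfold oscillate_range oscillate_range_alt
  rw [← h0]
  exact oscLoop_eq stop (stop + 1 - 0).toNat 0 le_rfl rfl
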